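-- pv_equiv track=rewrite | github.com/kbreivik/ai-local-agent-tools | mcp_server/tools/vm.py | _split_chain
-- ===== SOURCE A (Python) =====
-- def _split_chain(cmd: str) -> list[str]:
--     """Split cmd on && / ||, respecting quoted strings.
--
--     Returns the list of sub-commands. Single-element list when no chain ops.
--     """
--     parts: list[str] = []
--     current: list[str] = []
--     in_quote: str | None = None
--     i = 0
--     while i < len(cmd):
--         ch = cmd[i]
--         if in_quote:
--             current.append(ch)
--             if ch == in_quote:
--                 in_quote = None
--             i += 1
--         elif ch in ('"', "'"):
--             in_quote = ch
--             current.append(ch)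
--             i += 1
--         elif i + 1 < len(cmd) and cmd[i:i + 2] in ('&&', '||'):
--             parts.append("".join(current).strip())
--             current = []
--             i += 2
--         else:
--             current.append(ch)
--             i += 1
--     parts.append("".join(current).strip())
--     return [p for p in parts if p]
-- ===== SOURCE B (Python) =====
-- def _split_chain(cmd: str) -> list[str]:
--     """Split cmd on && / ||, respecting quoted strings.
--
--     Tokenize first (whole quoted spans, operators, single chars),
--     then fold the tokens into parts.
--     """
--     tokens: list[str] = []
--     i = 0
--     n = len(cmd)
--     while i < n:
--         ch = cmd[i]
--         if ch in ('"', "'"):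
--             j = cmd.find(ch, i + 1)
--             if j == -1:
--                 tokens.append(cmd[i:])
--                 i = n
--             else:
--                 tokens.append(cmd[i:j + 1])
--                 i = j + 1
--         elif cmd[i:i + 2] in ('&&', '||'):
--             tokens.append(cmd[i:i + 2])
--             i += 2
--         else:
--             tokens.append(ch)
--             i += 1
--     parts: list[str] = []
--     buf: list[str] = []
--     for t in tokens:
--         if t in ('&&', '||'):
--             parts.append("".join(buf).strip())
--             buf = []
--         else:
--             buf.append(t)
--     parts.append("".join(buf).strip())
--     return [p for p in parts if p]
-- ===== Notes on version B (the rewrite author's own statement) =====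
-- stated objective: alternative
-- what changed: A is a single character-by-character scan carrying an in_quote state across iterations; B first tokenizes the command into whole tokens (complete quoted spans found via str.find, '&&'/'||' operators, single characters) and then folds the token list into parts, flushing the buffer at operator tokens.
import Mathlib
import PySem

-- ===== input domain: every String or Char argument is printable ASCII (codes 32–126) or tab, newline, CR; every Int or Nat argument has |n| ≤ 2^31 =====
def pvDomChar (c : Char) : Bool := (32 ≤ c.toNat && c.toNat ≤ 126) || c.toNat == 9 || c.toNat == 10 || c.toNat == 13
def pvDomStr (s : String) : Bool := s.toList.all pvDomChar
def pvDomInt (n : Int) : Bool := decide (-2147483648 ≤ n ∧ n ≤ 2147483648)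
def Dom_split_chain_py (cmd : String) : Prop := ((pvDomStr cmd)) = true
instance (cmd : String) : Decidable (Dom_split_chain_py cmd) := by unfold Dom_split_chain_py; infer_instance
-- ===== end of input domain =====

-- B tokenizes the command first (whole quoted spans, operators, single chars) and then folds
-- the tokens into parts — an alternative two-phase decomposition of A's single char-by-char scan.


-- ===== PORT A =====
-- "".join(current).strip()  (shared helper, used by both ports)
def pvStrip (cur : List Char) : String := PySem.Str.strip (String.ofList cur)

-- A's while loop: state (parts, current, in_quote), scanning the chars of cmd.
def aLoop : List Char → List String → List Char → Option Char → List String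
  | [], parts, cur, _ => parts ++ [pvStrip cur]
  | ch :: rest, parts, cur, some q =>
      aLoop rest parts (cur ++ [ch]) (if ch = q then none else some q)
  | ch :: rest, parts, cur, none =>
      if ch = '"' ∨ ch = '\'' then
        aLoop rest parts (cur ++ [ch]) (some ch)
      else
        match rest with
        | c2 :: rest2 =>
            if (ch = '&' ∧ c2 = '&') ∨ (ch = '|' ∧ c2 = '|') then
              aLoop rest2 (parts ++ [pvStrip cur]) [] none
            else
              aLoop (c2 :: rest2) parts (cur ++ [ch]) none
        | [] => aLoop [] parts (cur ++ [ch]) none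

def split_chain_py (cmd : String) : List String :=
  (aLoop cmd.toList [] [] none).filter (fun p => p ≠ "")

-- ===== PORT B =====
-- cmd.find(ch, i+1) + slice: split the rest at the first closing quote (inclusive).
def breakQuote (q : Char) : List Char → List Char × List Char
  | [] => ([], [])
  | c :: rest =>
      if c = q then ([c], rest)
      else
        let p := breakQuote q rest
        (c :: p.1, p.2)

theorem breakQuote_snd_len (q : Char) : ∀ l : List Char, (breakQuote q l).2.length ≤ l.length := by
  intro l
  induction l with
  | nil => simp [breakQuote]
  | cons c rest ih =>
      simp only [breakQuote]
      split
      · simp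
      · simpa using Nat.le_succ_of_le ih

-- B's first phase: the token list.
def tokenize : List Char → List (List Char)
  | [] => []
  | c :: rest =>
      if c = '"' ∨ c = '\'' then
        let p := breakQuote c rest
        (c :: p.1) :: tokenize p.2
      else
        match rest with
        | c2 :: rest2 =>
            if (c = '&' ∧ c2 = '&') ∨ (c = '|' ∧ c2 = '|') then
              [c, c2] :: tokenize rest2
            else
              [c] :: tokenize (c2 :: rest2)
        | [] => [c] :: tokenize []
  termination_by l => l.length
  decreasing_by
    · have := breakQuote_snd_len c rest
      simp; omega
    · simp
    · simp
    · simp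

-- B's second phase: fold the tokens, flushing the buffer at operators.
def bLoop : List (List Char) → List String → List Char → List String
  | [], parts, buf => parts ++ [pvStrip buf]
  | t :: ts, parts, buf =>
      if t = ['&', '&'] ∨ t = ['|', '|'] then
        bLoop ts (parts ++ [pvStrip buf]) []
      else
        bLoop ts parts (buf ++ t)

def split_chain_py_alt (cmd : String) : List String :=
  (bLoop (tokenize cmd.toList) [] []).filter (fun p => p ≠ "")

-- ===== PRECONDITION & SPEC =====
def Spec_split_chain_py (cmd : String) (out : List String) : Prop := out = split_chain_py_alt cmd
instance (cmd : String) (out : List String) : Decidable (Spec_split_chain_py cmd out) := by unfold Spec_split_chain_py; infer_instance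

-- ===== CLAIM (what is proved, stated in full; the proofs are below) =====
def Claim_equal_split_chain_py : Prop := ∀ (cmd : String), Dom_split_chain_py cmd → Spec_split_chain_py cmd (split_chain_py cmd)

-- ===== LEMMAS AND PROOFS =====

-- A's in-quote scanning of a quoted span equals jumping over breakQuote's split at once.
theorem aLoop_quote (q : Char) :
    ∀ (l : List Char) (parts : List String) (cur : List Char),
      aLoop l parts cur (some q) =
        aLoop (breakQuote q l).2 parts (cur ++ (breakQuote q l).1) none := by
  intro l
  induction l with
  | nil => intro parts cur; simp [breakQuote, aLoop.eq_def]
  | cons c rest ih =>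
      intro parts cur
      by_cases h : c = q
      · rw [aLoop.eq_def]
        simp [breakQuote, h]
      · rw [aLoop.eq_def]
        simp only [breakQuote, if_neg h]
        rw [ih]
        simp

theorem main_loop :
    ∀ (n : ℕ) (l : List Char) (parts : List String) (cur : List Char), l.length ≤ n →
      aLoop l parts cur none = bLoop (tokenize l) parts cur := by
  intro n
  induction n with
  | zero =>
      intro l parts cur hl
      have : l = [] := List.length_eq_zero_iff.mp (Nat.le_zero.mp hl)
      subst this
      simp [aLoop.eq_def, tokenize, bLoop]
  | succ n ih =>
      intro l parts cur hl
      match l with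
      | [] => simp [aLoop.eq_def, tokenize, bLoop]
      | c :: rest =>
        by_cases hq : c = '"' ∨ c = '\''
        · -- quote: A scans the span char by char, B takes the whole token
          have hop : ¬ (c :: (breakQuote c rest).1 = ['&', '&'] ∨
                        c :: (breakQuote c rest).1 = ['|', '|']) := by
            rcases hq with h | h <;> subst h <;> rintro (he | he) <;>
              (injection he with h1 _; exact absurd h1 (by decide))
          rw [aLoop.eq_def, tokenize.eq_def]
          simp only [if_pos hq]
          rw [aLoop_quote, bLoop.eq_def]
          simp only [if_neg hop]
          have hlen : (breakQuote c rest).2.length ≤ n := by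
            have := breakQuote_snd_len c rest
            simp at hl; omega
          rw [ih _ _ _ hlen, List.append_assoc]
          rfl
        · rw [aLoop.eq_def, tokenize.eq_def]
          simp only [if_neg hq]
          match rest with
          | [] =>
              have hsingle : ¬ ([c] = ['&', '&'] ∨ [c] = ['|', '|']) := by
                rintro (h | h) <;> (injection h with h1 h2; cases h2)
              show aLoop [] parts (cur ++ [c]) none = bLoop ([c] :: tokenize []) parts cur
              rw [bLoop.eq_def]
              simp only [if_neg hsingle]
              rw [aLoop.eq_def, tokenize.eq_def, bLoop.eq_def]
          | c2 :: rest2 =>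
              show (if (c = '&' ∧ c2 = '&') ∨ (c = '|' ∧ c2 = '|') then
                      aLoop rest2 (parts ++ [pvStrip cur]) [] none
                    else aLoop (c2 :: rest2) parts (cur ++ [c]) none) =
                   bLoop (if (c = '&' ∧ c2 = '&') ∨ (c = '|' ∧ c2 = '|') then
                            [c, c2] :: tokenize rest2
                          else [c] :: tokenize (c2 :: rest2)) parts cur
              by_cases hop : (c = '&' ∧ c2 = '&') ∨ (c = '|' ∧ c2 = '|')
              · -- operator
                have htok : [c, c2] = ['&', '&'] ∨ [c, c2] = ['|', '|'] := by
                  rcases hop with ⟨h1, h2⟩ | ⟨h1, h2⟩ <;> subst h1 <;> subst h2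
                  · exact Or.inl rfl
                  · exact Or.inr rfl
                rw [if_pos hop, if_pos hop, bLoop.eq_def]
                simp only [if_pos htok]
                exact ih _ _ _ (by simp at hl ⊢; omega)
              · -- plain character
                have hsingle : ¬ ([c] = ['&', '&'] ∨ [c] = ['|', '|']) := by
                  rintro (h | h) <;> (injection h with h1 h2; cases h2)
                rw [if_neg hop, if_neg hop, bLoop.eq_def]
                simp only [if_neg hsingle]
                exact ih _ _ _ (by simp at hl ⊢; omega)

-- ===== VERDICT (by name: the statement is the Claim_ definition above) =====
theorem split_chain_py_spec : Claim_equal_split_chain_py := by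
  intro cmd _
  unfold Spec_split_chain_py split_chain_py split_chain_py_alt
  rw [main_loop cmd.toList.length cmd.toList [] [] le_rfl]
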